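-- pv_equiv track=rewrite | github.com/Arisha1234567/- | 14.py | drop_one_and_five
-- ===== SOURCE A (Python) =====
-- def drop_one_and_five(n):
--     result = 0  # Инициализация результата
--     multiplier = 1  # Инициализация множителя для позиции цифры
--     while n > 0:  # Пока число больше 0
--         digit = n % 10  # Получаем последнюю цифру числа
--         n //= 10  # Убираем последнюю цифру из числа
--         if digit != 1 and digit != 5:  # Если цифра не 1 и не 5
--             result += digit * multiplier  # Добавляем цифру в результат с учетом множителя
--             multiplier *= 10  # Увеличиваем множитель на порядок
--     return result  # Возвращаем итоговый результат
-- ===== SOURCE B (Python) =====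
-- def drop_one_and_five(n):
--     if n <= 0:
--         return 0
--     result = 0
--     for c in str(n):
--         if c != '1' and c != '5':
--             result = result * 10 + int(c)
--     return result
-- ===== Notes on version B (the rewrite author's own statement) =====
-- stated objective: idiomatic
-- what changed: Replaces the arithmetic while-loop that extracts digits least-significant-first and reassembles them with an explicit positional multiplier by the idiomatic string pass: traverse str(n) most-significant-first and accumulate result*10 + int(c) for the kept characters.
import Mathlib
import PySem

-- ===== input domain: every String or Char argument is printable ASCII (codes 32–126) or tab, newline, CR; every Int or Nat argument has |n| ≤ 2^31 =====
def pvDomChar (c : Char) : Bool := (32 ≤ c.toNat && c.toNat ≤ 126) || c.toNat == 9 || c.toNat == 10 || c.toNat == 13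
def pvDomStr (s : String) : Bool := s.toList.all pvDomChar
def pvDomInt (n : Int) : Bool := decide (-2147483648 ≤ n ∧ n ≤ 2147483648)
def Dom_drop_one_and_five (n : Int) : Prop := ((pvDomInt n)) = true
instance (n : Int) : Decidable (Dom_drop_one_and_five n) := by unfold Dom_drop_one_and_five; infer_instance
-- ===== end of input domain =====

-- B re-implements A's digit-by-digit arithmetic loop as the idiomatic string pass:
-- filter str(n) most-significant-first, accumulating result*10 + int(c); same values, no speed claim.

-- ===== PORT A =====
-- A's while-loop: state (n, result, multiplier), least-significant digit first
def dropLoop (n result multiplier : Int) : Int :=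
  if h : 0 < n then
    let digit := PySem.Int.mod n 10
    let n' := PySem.Int.floordiv n 10
    if digit ≠ 1 ∧ digit ≠ 5 then
      dropLoop n' (result + digit * multiplier) (multiplier * 10)
    else
      dropLoop n' result multiplier
  else
    result
termination_by n.toNat
decreasing_by
  all_goals
    simp only [PySem.Int.floordiv_eq_ediv_of_pos (by norm_num : (0:Int) < 10)]
    omega

def drop_one_and_five (n : Int) : Int := dropLoop n 0 1

-- ===== PORT B =====
-- port of int(c) for a single decimal digit character (exact there: int('7') = 7)
def pyIntOfDigitChar (c : Char) : Int := (PySem.Int.ofChars? [c]).getD 0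

def drop_one_and_five_alt (n : Int) : Int :=
  if n ≤ 0 then 0
  else
    (PySem.Int.toChars n).foldl
      (fun result c => if c ≠ '1' ∧ c ≠ '5' then result * 10 + pyIntOfDigitChar c else result) 0

-- ===== PRECONDITION & SPEC =====
def Spec_drop_one_and_five (n : Int) (out : Int) : Prop := out = drop_one_and_five_alt n
instance (n : Int) (out : Int) : Decidable (Spec_drop_one_and_five n out) := by unfold Spec_drop_one_and_five; infer_instance

-- ===== CLAIM (what is proved, stated in full; the proofs are below) =====
def Claim_equal_drop_one_and_five : Prop := ∀ (n : Int), Dom_drop_one_and_five n → Spec_drop_one_and_five n (drop_one_and_five n)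

-- ===== LEMMAS AND PROOFS =====

-- value of the kept digits, least-significant digit first
def keepVal : List Nat → Int
  | [] => 0
  | d :: t => if d ≠ 1 ∧ d ≠ 5 then (d : Int) + 10 * keepVal t else keepVal t

-- number of kept digits
def keepCnt : List Nat → Nat
  | [] => 0
  | d :: t => (if d ≠ 1 ∧ d ≠ 5 then 1 else 0) + keepCnt t

lemma dropLoop_eq (m : Nat) : ∀ (result multiplier : Int),
    dropLoop (m : Int) result multiplier = result + multiplier * keepVal (Nat.digits 10 m) := by
  induction m using Nat.strong_induction_on with
  | _ m ih =>
    intro result multiplier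
    rcases Nat.eq_zero_or_pos m with hz | hp
    · subst hz
      rw [dropLoop]
      simp [keepVal]
    · rw [dropLoop]
      have hmod : PySem.Int.mod ((m : Nat) : Int) 10 = ((m % 10 : Nat) : Int) := by
        exact_mod_cast PySem.Int.mod_natCast m 10
      have hdiv : PySem.Int.floordiv ((m : Nat) : Int) 10 = ((m / 10 : Nat) : Int) := by
        exact_mod_cast PySem.Int.floordiv_natCast m 10
      simp only [dif_pos (by exact_mod_cast hp : (0 : Int) < (m : Int)), hmod, hdiv]
      rw [Nat.digits_def' (by norm_num : 1 < 10) hp]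
      have hrec := ih (m / 10) (Nat.div_lt_self hp (by norm_num))
      by_cases hk : ((m % 10 : Nat) : Int) ≠ 1 ∧ ((m % 10 : Nat) : Int) ≠ 5
      · have hk' : m % 10 ≠ 1 ∧ m % 10 ≠ 5 := by
          constructor <;> intro h <;> [exact hk.1 (by exact_mod_cast h); exact hk.2 (by exact_mod_cast h)]
        rw [if_pos hk, hrec]
        simp only [keepVal, if_pos hk']
        ring
      · have hk' : ¬ (m % 10 ≠ 1 ∧ m % 10 ≠ 5) := by
          intro h
          exact hk ⟨by exact_mod_cast h.1, by exact_mod_cast h.2⟩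
        rw [if_neg hk, hrec]
        simp only [keepVal, if_neg hk']

lemma toDigitsCore_eq (fuel : Nat) : ∀ (m : Nat) (acc : List Char), 0 < m → m < fuel →
    Nat.toDigitsCore 10 fuel m acc = ((Nat.digits 10 m).map Nat.digitChar).reverse ++ acc := by
  induction fuel with
  | zero => intro m acc hm hf; omega
  | succ fuel ih =>
    intro m acc hm hf
    rw [Nat.toDigitsCore]
    by_cases h0 : m / 10 = 0
    · simp only [h0, if_pos]
      rw [Nat.digits_def' (by norm_num : 1 < 10) hm, h0]
      simp
    · simp only [if_neg h0]
      have hm10 : 10 ≤ m := by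
        by_contra h
        exact h0 (Nat.div_eq_of_lt (by omega))
      rw [ih (m / 10) _ (Nat.pos_of_ne_zero h0) (by omega)]
      rw [Nat.digits_def' (by norm_num : 1 < 10) hm]
      simp

lemma toDigits_eq (m : Nat) (hm : 0 < m) :
    Nat.toDigits 10 m = ((Nat.digits 10 m).map Nat.digitChar).reverse := by
  rw [Nat.toDigits, toDigitsCore_eq (m + 1) m [] hm (by omega)]
  simp

lemma digitChar_keep_iff (d : Nat) (hd : d < 10) :
    ((Nat.digitChar d ≠ '1' ∧ Nat.digitChar d ≠ '5') ↔ (d ≠ 1 ∧ d ≠ 5)) := by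
  interval_cases d <;> decide

lemma pyIntOfDigitChar_digitChar (d : Nat) (hd : d < 10) :
    pyIntOfDigitChar (Nat.digitChar d) = (d : Int) := by
  interval_cases d <;> decide

lemma foldl_rev_digits (ds : List Nat) : ∀ (acc : Int), (∀ d ∈ ds, d < 10) →
    ((ds.map Nat.digitChar).reverse).foldl
      (fun result c => if c ≠ '1' ∧ c ≠ '5' then result * 10 + pyIntOfDigitChar c else result) acc
    = acc * 10 ^ keepCnt ds + keepVal ds := by
  induction ds with
  | nil => intro acc _; simp [keepCnt, keepVal]
  | cons d t ih =>
    intro acc hlt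
    have hd : d < 10 := hlt d (by simp)
    have ht : ∀ x ∈ t, x < 10 := fun x hx => hlt x (by simp [hx])
    simp only [List.map_cons, List.reverse_cons, List.foldl_append, List.foldl_cons, List.foldl_nil]
    rw [ih acc ht]
    by_cases hk : d ≠ 1 ∧ d ≠ 5
    · rw [if_pos ((digitChar_keep_iff d hd).mpr hk), pyIntOfDigitChar_digitChar d hd]
      simp only [keepCnt, keepVal, if_pos hk]
      rw [pow_add]
      push_cast
      ring
    · rw [if_neg (fun h => hk ((digitChar_keep_iff d hd).mp h))]
      simp only [keepCnt, keepVal, if_neg hk]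
      norm_num

-- ===== VERDICT (by name: the statement is the Claim_ definition above) =====
theorem drop_one_and_five_spec : Claim_equal_drop_one_and_five := by
  intro n _
  unfold Spec_drop_one_and_five drop_one_and_five drop_one_and_five_alt
  by_cases hn : n ≤ 0
  · rw [if_pos hn, dropLoop]
    simp [not_lt.mpr hn]
  · replace hn := lt_of_not_ge hn
    rw [if_neg (not_le.mpr hn)]
    have hrepr : n = ((n.toNat : Nat) : Int) := by omega
    have hmpos : 0 < n.toNat := by omega
    rw [hrepr, dropLoop_eq n.toNat 0 1]
    have htc : PySem.Int.toChars ((n.toNat : Nat) : Int) = Nat.toDigits 10 n.toNat := by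
      rw [PySem.Int.toChars, if_neg (by omega : ¬ ((n.toNat : Nat) : Int) < 0)]
      congr 1
    rw [htc, toDigits_eq n.toNat hmpos,
      foldl_rev_digits (Nat.digits 10 n.toNat) 0
        (fun d hd => Nat.digits_lt_base (by norm_num) hd)]
    simp
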